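-- pv_equiv track=rewrite | github.com/adarshnb95/GenAI_ERT | summarization/summarize.py | extract_n2_fields_from_text
-- ===== SOURCE A (Python) =====
-- def extract_n2_fields_from_text(raw_text: str, allowed: dict) -> dict:
--     """
--     Rule-based sweep: for each allowed field, look for any of its exact phrases
--     in the raw N-2 text. Return a dict mapping each field → matched phrase or None.
--     """
--     results = {}
--     lower_text = raw_text.lower()
--     for field, options in allowed.items():
--         found = None
--         for opt in options:
--             if opt.lower() in lower_text:
--                 found = opt
--                 break
--         results[field] = found
--     return results
-- ===== SOURCE B (Python) =====
-- def extract_n2_fields_from_text(raw_text: str, allowed: dict) -> dict: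
--     """Two-phase rewrite: phase 1 builds a memo of which lowered phrases occur in
--     the text (each distinct phrase searched at most once across all fields, and a
--     field's options are not searched past its first present phrase, which is the
--     only one that can matter); phase 2 selects each field's first present option
--     by memo lookup alone."""
--     lower_text = raw_text.lower()
--     present = {}
--     for options in allowed.values():
--         for opt in options:
--             low = opt.lower()
--             if low not in present:
--                 present[low] = low in lower_text
--             if present[low]:
--                 break
--     return {field: next((opt for opt in options if present.get(opt.lower(), False)), None)
--             for field, options in allowed.items()}
-- ===== Notes on version B (the rewrite author's own statement) =====
-- stated objective: alternative
-- what changed: A records the matched phrase inline while scanning each field's options; B splits the work into a phase that builds a presence memo keyed by lowered phrase (each distinct phrase searched in the text at most once across all fields, stopping a field's scan at its first present phrase) and a lookup-only selection phase that picks each field's first present option from the memo.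
import Mathlib
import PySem

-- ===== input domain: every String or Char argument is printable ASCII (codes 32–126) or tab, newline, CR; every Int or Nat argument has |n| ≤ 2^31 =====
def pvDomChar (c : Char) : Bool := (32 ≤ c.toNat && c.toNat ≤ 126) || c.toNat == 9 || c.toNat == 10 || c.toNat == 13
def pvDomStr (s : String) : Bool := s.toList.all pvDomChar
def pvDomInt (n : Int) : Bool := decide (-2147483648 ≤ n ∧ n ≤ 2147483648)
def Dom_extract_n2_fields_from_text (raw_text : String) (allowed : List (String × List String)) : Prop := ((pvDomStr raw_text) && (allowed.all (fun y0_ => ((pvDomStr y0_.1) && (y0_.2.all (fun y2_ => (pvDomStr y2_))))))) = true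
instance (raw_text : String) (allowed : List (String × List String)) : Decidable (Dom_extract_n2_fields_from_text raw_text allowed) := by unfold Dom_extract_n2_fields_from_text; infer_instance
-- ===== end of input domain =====

-- B replaces A's inline per-field scan-and-record with a two-phase form: a presence memo over
-- lowered phrases built first (deduplicating repeated phrases), then a lookup-only selection
-- pass per field (objective: alternative).

-- ===== PORT A =====
-- inner loop of A: found = None; for opt in options: if opt.lower() in lower_text: found = opt; break
def pvFindOptA (lower_text : String) : List String → Option String
  | [] => none
  | opt :: rest =>
      if PySem.Str.isIn (PySem.Str.lower opt) lower_text then some opt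
      else pvFindOptA lower_text rest

def extract_n2_fields_from_text (raw_text : String) (allowed : List (String × List String)) : List (String × Option String) :=
  let lower_text := PySem.Str.lower raw_text
  (allowed.foldl
      (fun results fo => results.insert fo.1 (pvFindOptA lower_text fo.2))
      (PySem.Dict.empty : PySem.Dict String (Option String))).items

-- ===== PORT B =====
-- phase-1 inner loop of B: low = opt.lower(); if low not in present: present[low] = low in lower_text;
-- if present[low]: break
-- 'if low not in present: present[low] = low in lower_text' (one phase-1 memo update)
def pvMemoStep (lower_text : String) (present : PySem.Dict String Bool) (low : String) : PySem.Dict String Bool :=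
  if present.contains low then present
  else present.insert low (PySem.Str.isIn low lower_text)

def pvMemoField (lower_text : String) (present : PySem.Dict String Bool) : List String → PySem.Dict String Bool
  | [] => present
  | opt :: rest =>
      let low := PySem.Str.lower opt
      let p' := pvMemoStep lower_text present low
      if p'.getD low false then p' else pvMemoField lower_text p' rest

def extract_n2_fields_from_text_alt (raw_text : String) (allowed : List (String × List String)) : List (String × Option String) :=
  let lower_text := PySem.Str.lower raw_text
  let present : PySem.Dict String Bool :=
    allowed.foldl (fun d fo => pvMemoField lower_text d fo.2) PySem.Dict.empty
  (allowed.foldl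
      (fun results fo =>
        results.insert fo.1 (fo.2.find? (fun opt => present.getD (PySem.Str.lower opt) false)))
      (PySem.Dict.empty : PySem.Dict String (Option String))).items

-- ===== PRECONDITION & SPEC =====
def Spec_extract_n2_fields_from_text (raw_text : String) (allowed : List (String × List String)) (out : List (String × Option String)) : Prop := out = extract_n2_fields_from_text_alt raw_text allowed
instance (raw_text : String) (allowed : List (String × List String)) (out : List (String × Option String)) : Decidable (Spec_extract_n2_fields_from_text raw_text allowed out) := by unfold Spec_extract_n2_fields_from_text; infer_instance

-- ===== CLAIM (what is proved, stated in full; the proofs are below) =====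
def Claim_equal_extract_n2_fields_from_text : Prop := ∀ (raw_text : String) (allowed : List (String × List String)), Dom_extract_n2_fields_from_text raw_text allowed → Spec_extract_n2_fields_from_text raw_text allowed (extract_n2_fields_from_text raw_text allowed)

-- ===== LEMMAS AND PROOFS =====

-- every value stored in the memo is the substring test of its key
def pvGood (t : String) (d : PySem.Dict String Bool) : Prop :=
  ∀ k b, d.get? k = some b → b = PySem.Str.isIn k t

-- the memo covers a field's options up to (and including) its first present one
def pvCovers (t : String) (d : PySem.Dict String Bool) : List String → Prop
  | [] => True
  | o :: rest => d.contains (PySem.Str.lower o) = true ∧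
      (PySem.Str.isIn (PySem.Str.lower o) t = false → pvCovers t d rest)

theorem pvGood_getD (t : String) (d : PySem.Dict String Bool) (k : String)
    (hg : pvGood t d) (hc : d.contains k = true) :
    d.getD k false = PySem.Str.isIn k t := by
  rw [PySem.Dict.contains_eq_isSome_get?] at hc
  rcases Option.isSome_iff_exists.mp hc with ⟨b, hb⟩
  rw [PySem.Dict.getD_eq_get?_getD, hb]
  simpa using hg _ b hb

-- the one-option phase-1 step: if present.contains low then present else present.insert low (isIn low t)
theorem pvStep_good (t low : String) (d : PySem.Dict String Bool) (hg : pvGood t d) :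
    pvGood t (pvMemoStep t d low) := by
  unfold pvMemoStep; split_ifs with hc
  · exact hg
  · intro k b hk
    rw [PySem.Dict.get?_insert] at hk
    split_ifs at hk with hke
    · cases hk; subst hke; rfl
    · exact hg k b hk

theorem pvStep_contains_self (t low : String) (d : PySem.Dict String Bool) :
    (pvMemoStep t d low).contains low = true := by
  unfold pvMemoStep; split_ifs with hc
  · exact hc
  · exact PySem.Dict.contains_insert_self _ _ _

theorem pvStep_mono (t low k : String) (d : PySem.Dict String Bool) (hk : d.contains k = true) :
    (pvMemoStep t d low).contains k = true := by
  unfold pvMemoStep; split_ifs with hc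
  · exact hk
  · rw [PySem.Dict.contains_insert, hk, Bool.or_true]

theorem pvStep_getD (t low : String) (d : PySem.Dict String Bool) (hg : pvGood t d) :
    (pvMemoStep t d low).getD low false = PySem.Str.isIn low t :=
  pvGood_getD t _ low (pvStep_good t low d hg) (pvStep_contains_self t low d)

theorem pvMemoField_good (t : String) (opts : List String) (d : PySem.Dict String Bool)
    (hg : pvGood t d) : pvGood t (pvMemoField t d opts) := by
  induction opts generalizing d with
  | nil => exact hg
  | cons o rest ih =>
      simp only [pvMemoField]
      split_ifs with hb
      · exact pvStep_good t _ d hg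
      · exact ih _ (pvStep_good t _ d hg)

theorem pvMemoField_mono (t : String) (opts : List String) (d : PySem.Dict String Bool)
    (k : String) (hk : d.contains k = true) : (pvMemoField t d opts).contains k = true := by
  induction opts generalizing d with
  | nil => exact hk
  | cons o rest ih =>
      simp only [pvMemoField]
      split_ifs with hb
      · exact pvStep_mono t _ k d hk
      · exact ih _ (pvStep_mono t _ k d hk)

theorem pvCovers_mono (t : String) (opts : List String) (d d' : PySem.Dict String Bool)
    (hmono : ∀ k, d.contains k = true → d'.contains k = true)
    (h : pvCovers t d opts) : pvCovers t d' opts := by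
  induction opts with
  | nil => trivial
  | cons o rest ih => exact ⟨hmono _ h.1, fun hf => ih (h.2 hf)⟩

theorem pvMemoField_covers (t : String) (opts : List String) (d : PySem.Dict String Bool)
    (hg : pvGood t d) : pvCovers t (pvMemoField t d opts) opts := by
  induction opts generalizing d with
  | nil => trivial
  | cons o rest ih =>
      simp only [pvMemoField]
      split_ifs with hb
      · refine ⟨pvStep_contains_self t _ d, fun hf => ?_⟩
        rw [pvStep_getD t _ d hg] at hb
        rw [hf] at hb; cases hb
      · refine ⟨pvMemoField_mono t rest _ _ (pvStep_contains_self t _ d), fun _ => ?_⟩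
        exact ih _ (pvStep_good t _ d hg)

theorem pvMemoOuter_good (t : String) (allowed : List (String × List String))
    (d : PySem.Dict String Bool) (hg : pvGood t d) :
    pvGood t (allowed.foldl (fun d fo => pvMemoField t d fo.2) d) := by
  induction allowed generalizing d with
  | nil => exact hg
  | cons fo rest ih => exact ih _ (pvMemoField_good t fo.2 d hg)

theorem pvMemoOuter_mono (t : String) (allowed : List (String × List String))
    (d : PySem.Dict String Bool) (k : String) (hk : d.contains k = true) :
    (allowed.foldl (fun d fo => pvMemoField t d fo.2) d).contains k = true := by
  induction allowed generalizing d with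
  | nil => exact hk
  | cons fo rest ih => exact ih _ (pvMemoField_mono t fo.2 d k hk)

theorem pvMemoOuter_covers (t : String) (allowed : List (String × List String))
    (d : PySem.Dict String Bool) (hg : pvGood t d) (fo : String × List String)
    (hfo : fo ∈ allowed) :
    pvCovers t (allowed.foldl (fun d fo => pvMemoField t d fo.2) d) fo.2 := by
  induction allowed generalizing d with
  | nil => cases hfo
  | cons g rest ih =>
      rcases List.mem_cons.mp hfo with rfl | hmem
      · exact pvCovers_mono t fo.2 _ _ (fun k => pvMemoOuter_mono t rest _ k)
          (pvMemoField_covers t fo.2 d hg)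
      · exact ih _ (pvMemoField_good t g.2 d hg) hmem

-- with a good memo covering the field, B's lookup scan is A's substring scan
theorem pvFind_eq (t : String) (D : PySem.Dict String Bool) (opts : List String)
    (hg : pvGood t D) (hcov : pvCovers t D opts) :
    opts.find? (fun opt => D.getD (PySem.Str.lower opt) false) = pvFindOptA t opts := by
  induction opts with
  | nil => rfl
  | cons o rest ih =>
      have hget : D.getD (PySem.Str.lower o) false = PySem.Str.isIn (PySem.Str.lower o) t :=
        pvGood_getD t D _ hg hcov.1
      cases hc : PySem.Chars.isIn (PySem.Chars.lower o.toList) t.toList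
      · have hc' : PySem.Str.isIn (PySem.Str.lower o) t = false := by simpa using hc
        simp [List.find?, pvFindOptA, hget, hc, ih (hcov.2 hc')]
      · have hc' : PySem.Str.isIn (PySem.Str.lower o) t = true := by simpa using hc
        simp [List.find?, pvFindOptA, hget, hc]

-- ===== VERDICT (by name: the statement is the Claim_ definition above) =====
theorem extract_n2_fields_from_text_spec : Claim_equal_extract_n2_fields_from_text := by
  intro raw_text allowed _
  show _ = _
  unfold extract_n2_fields_from_text extract_n2_fields_from_text_alt
  simp only []
  congr 1
  refine PySem.List.foldl_congr_mem _ _ _ _ ?_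
  intro acc fo hfo
  congr 1
  have hgood : pvGood (PySem.Str.lower raw_text)
      (allowed.foldl (fun d fo => pvMemoField (PySem.Str.lower raw_text) d fo.2) PySem.Dict.empty) := by
    refine pvMemoOuter_good _ allowed _ ?_
    intro k b h; simp [PySem.Dict.get?_empty] at h
  have hcov := pvMemoOuter_covers (PySem.Str.lower raw_text) allowed PySem.Dict.empty
    (by intro k b h; simp [PySem.Dict.get?_empty] at h) fo hfo
  exact (pvFind_eq _ _ fo.2 hgood hcov).symm
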